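-- pv_equiv track=rewrite | github.com/Ominox0/quattro | txt/compiler.py | compile_asm
-- ===== SOURCE A (Python) =====
-- def compile_asm(asm_code):
--     """
--     Simple ASM compiler for the 4-bit (base-4) logic system.
--
--     Instruction Format (6 base-4 digits):
--     [Instr0] [Instr1] [RNF0] [RNF1] [A] [B]
--
--     Types:
--     0: Arithmetic (Instr1 selects ADD=0, SUB=1, MUL=2, DIV=3)
--     1: Logic      (Instr1 selects MIN=0, MAX=1, MOD=2, NOT=3)
--     2: Code       (Instr1 selects LOAD=0, STORE=1, COPY=2, HLT=3)
--
--     RNF (Register/None/Flag):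
--     0: Register
--     1: Flag
--     2: Immediate (None)
--
--     A, B: Address (0-15) or Immediate Value (0-3)
--     """
--
--     instructions = {
--         'ADD':   (0, 0),
--         'SUB':   (0, 1),
--         'MUL':   (0, 2),
--         'DIV':   (0, 3),
--         'MIN':   (1, 0),
--         'MAX':   (1, 1),
--         'MOD':   (1, 2),
--         'NOT':   (1, 3),
--         'LOAD':  (2, 0),
--         'STORE': (2, 1),
--         'COPY':  (2, 2),
--         'HLT':   (2, 3),
--     }
--
--     machine_code = []
--
--     for line in asm_code.split('\n'):
--         line = line.split('--')[0].strip() # Remove comments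
--         if not line:
--             continue
--
--         parts = line.replace(',', ' ').split()
--         op = parts[0].upper()
--
--         if op not in instructions:
--             raise ValueError(f"Unknown instruction: {op}")
--
--         instr0, instr1 = instructions[op]
--         rnf0, rnf1, a, b = 0, 0, 0, 0
--
--         # Parse operands based on instruction type
--         if op == 'HLT':
--             pass
--         elif op == 'LOAD':
--             # LOAD R(A) Imm
--             rnf0 = 0 # Reg
--             rnf1 = 2 # Immediate
--             a = int(parts[1][1:]) # R0 -> 0
--             b = int(parts[2])     # 1 -> 1
--         elif op == 'COPY':
--             # COPY R(B) R(A) -> R(B) = R(A)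
--             rnf0 = 0
--             rnf1 = 0
--             a = int(parts[2][1:]) # Source
--             b = int(parts[1][1:]) # Dest
--         elif op == 'STORE':
--             # STORE R(A) R(B)
--             rnf0 = 0
--             rnf1 = 0
--             a = int(parts[1][1:])
--             b = int(parts[2][1:])
--         elif op in ['ADD', 'SUB', 'MUL', 'DIV', 'MIN', 'MAX', 'MOD']:
--             # OP R(Dest) R(Src) -> R(Dest) = R(Dest) OP R(Src)
--             # Our CPU uses A as Dest and B as Src
--             rnf0 = 0
--             rnf1 = 0
--             a = int(parts[1][1:])
--             b = int(parts[2][1:])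
--         elif op == 'NOT':
--             # NOT R(A)
--             rnf0 = 0
--             rnf1 = 0
--             a = int(parts[1][1:])
--             b = 0
--
--         machine_code.append((instr0, instr1, rnf0, rnf1, a, b))
--
--     return machine_code
-- ===== SOURCE B (Python) =====
-- def compile_asm(asm_code):
--     """Two staged passes: a hand-written character-level scanner tokenizes the whole
--     program into per-line token lists (stripping '--' comments, commas and whitespace
--     in one sweep), then an emitter maps each token list to its 6-tuple, computing
--     (instr0, instr1) as divmod of the opcode's position in a flat opcode list."""
--
--     # ---- pass 1: character scanner -> list of non-empty token lists ----
--     lines = []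
--     toks = []
--     cur = []
--     comment = False
--     n = len(asm_code)
--     for i in range(n + 1):
--         c = asm_code[i] if i < n else '\n'   # virtual newline terminates last line
--         if c == '\n':
--             if cur:
--                 toks.append(''.join(cur))
--                 cur = []
--             if toks:
--                 lines.append(toks)
--             toks = []
--             comment = False
--         elif comment:
--             pass
--         elif c == '-' and i + 1 < n and asm_code[i + 1] == '-':
--             comment = True
--         elif c.isspace() or c == ',':
--             if cur:
--                 toks.append(''.join(cur))
--                 cur = []
--         else:
--             cur.append(c)
--
--     # ---- pass 2: emit machine code from token lists ----
--     OPS = ['ADD', 'SUB', 'MUL', 'DIV', 'MIN', 'MAX', 'MOD', 'NOT',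
--            'LOAD', 'STORE', 'COPY', 'HLT']
--     out = []
--     for t in lines:
--         op = t[0].upper()
--         if op not in OPS:
--             raise ValueError(f"Unknown instruction: {op}")
--         instr0, instr1 = divmod(OPS.index(op), 4)
--         if op == 'HLT':
--             rnf1, a, b = 0, 0, 0
--         elif op == 'LOAD':
--             rnf1, a, b = 2, int(t[1][1:]), int(t[2])
--         elif op == 'NOT':
--             rnf1, a, b = 0, int(t[1][1:]), 0
--         elif op == 'COPY':
--             rnf1, a, b = 0, int(t[2][1:]), int(t[1][1:])
--         else:
--             rnf1, a, b = 0, int(t[1][1:]), int(t[2][1:])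
--         out.append((instr0, instr1, 0, rnf1, a, b))
--     return out
-- ===== Notes on version B (the rewrite author's own statement) =====
-- stated objective: alternative
-- what changed: Replaces A's split('\n')/split('--')/strip/replace/split per-line pipeline and 7-branch if/elif dispatch with two staged passes: a hand-written character-level state-machine scanner that tokenizes the whole program in one sweep (handling newlines, '--' comments, commas and whitespace by explicit scanner state), followed by an emitter that computes (instr0, instr1) as divmod of the opcode's position in a flat opcode list.
import Mathlib
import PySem

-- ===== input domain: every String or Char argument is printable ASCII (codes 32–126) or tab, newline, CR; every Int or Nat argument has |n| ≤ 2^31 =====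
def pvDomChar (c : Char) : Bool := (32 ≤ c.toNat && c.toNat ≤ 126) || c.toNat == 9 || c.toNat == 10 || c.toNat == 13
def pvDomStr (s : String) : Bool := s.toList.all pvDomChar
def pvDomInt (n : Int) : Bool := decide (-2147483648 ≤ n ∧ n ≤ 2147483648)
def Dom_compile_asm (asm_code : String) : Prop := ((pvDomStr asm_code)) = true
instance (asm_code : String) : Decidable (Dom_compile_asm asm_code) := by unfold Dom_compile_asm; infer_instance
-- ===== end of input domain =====

-- B replaces A's split-based single pass by two staged passes: a hand-written character-level
-- state-machine tokenizer for the whole program, then an emitter with divmod-computed opcodes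
-- (objective: alternative; same return value as A on all inputs where A returns).


-- shared primitives (Python's int(s), parts[i], s[1:]) used by both ports
def pyInt (s : String) : Int := (PySem.Int.ofStr? s).getD 0        -- int(s); none (ValueError) is outside Pre_
def part (parts : List String) (i : Int) : String := (PySem.List.pyGet? parts i).getD ""  -- parts[i]; IndexError outside Pre_
def rtail (s : String) : String := PySem.Str.slice s (some 1) none  -- s[1:]

-- ===== PORT A =====
def instructionsA : PySem.Dict String (Int × Int) := PySem.Dict.mk
  [("ADD", (0, 0)), ("SUB", (0, 1)), ("MUL", (0, 2)), ("DIV", (0, 3)),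
   ("MIN", (1, 0)), ("MAX", (1, 1)), ("MOD", (1, 2)), ("NOT", (1, 3)),
   ("LOAD", (2, 0)), ("STORE", (2, 1)), ("COPY", (2, 2)), ("HLT", (2, 3))]

-- A's if/elif chain on the opcode (rnf0, rnf1, a, b default to 0)
def dispatchA (acc : List (Int × Int × Int × Int × Int × Int)) (parts : List String)
    (op : String) : List (Int × Int × Int × Int × Int × Int) :=
  if instructionsA.contains op then
    let p := (instructionsA.get? op).getD (0, 0)
    if op = "HLT" then acc ++ [(p.1, p.2, 0, 0, 0, 0)]
    else if op = "LOAD" then acc ++ [(p.1, p.2, 0, 2, pyInt (rtail (part parts 1)), pyInt (part parts 2))]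
    else if op = "COPY" then acc ++ [(p.1, p.2, 0, 0, pyInt (rtail (part parts 2)), pyInt (rtail (part parts 1)))]
    else if op = "STORE" then acc ++ [(p.1, p.2, 0, 0, pyInt (rtail (part parts 1)), pyInt (rtail (part parts 2)))]
    else if op ∈ ["ADD", "SUB", "MUL", "DIV", "MIN", "MAX", "MOD"] then
      acc ++ [(p.1, p.2, 0, 0, pyInt (rtail (part parts 1)), pyInt (rtail (part parts 2)))]
    else if op = "NOT" then acc ++ [(p.1, p.2, 0, 0, pyInt (rtail (part parts 1)), 0)]
    else acc ++ [(p.1, p.2, 0, 0, 0, 0)]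
  else acc  -- raise ValueError("Unknown instruction"): outside Pre_

def stepA (acc : List (Int × Int × Int × Int × Int × Int)) (raw : String) :
    List (Int × Int × Int × Int × Int × Int) :=
  let line := PySem.Str.strip (((PySem.Str.split? raw "--").getD []).headD "")
  if line = "" then acc
  else
    let parts := PySem.Str.split₀ (PySem.Str.replace line "," " ")
    dispatchA acc parts (PySem.Str.upper (part parts 0))

def compile_asm (asm_code : String) : List (Int × Int × Int × Int × Int × Int) :=
  ((PySem.Str.split? asm_code "\n").getD []).foldl stepA []

-- ===== PORT B =====
-- pass 1 of Source B: character-level scanner over the whole program; state = (current token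
-- chars, tokens of the current line, finished lines, inside-comment flag); a virtual final
-- newline ([] case) terminates the last line, exactly as Source B's range(n + 1) loop does.
def scanB : List Char → List Char → List String → List (List String) → Bool → List (List String)
  | [], cur, toks, lines, _ =>
      let toks' := if cur = [] then toks else toks ++ [String.ofList cur]
      if toks' = [] then lines else lines ++ [toks']
  | c :: rest, cur, toks, lines, comment =>
      if c = '\n' then
        let toks' := if cur = [] then toks else toks ++ [String.ofList cur]
        scanB rest [] [] (if toks' = [] then lines else lines ++ [toks']) false
      else if comment then scanB rest cur toks lines comment
      else if c = '-' ∧ rest.head? = some '-' then scanB rest cur toks lines true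
      else if PySem.Chars.isspace c ∨ c = ',' then
        scanB rest [] (if cur = [] then toks else toks ++ [String.ofList cur]) lines comment
      else scanB rest (cur ++ [c]) toks lines comment

def opsB : List String :=
  ["ADD", "SUB", "MUL", "DIV", "MIN", "MAX", "MOD", "NOT", "LOAD", "STORE", "COPY", "HLT"]

-- pass 2 of Source B: emit one 6-tuple per token list; (instr0, instr1) = divmod(OPS.index(op), 4)
def emitB (acc : List (Int × Int × Int × Int × Int × Int)) (t : List String) :
    List (Int × Int × Int × Int × Int × Int) :=
  let op := PySem.Str.upper (part t 0)
  match PySem.List.index? opsB op with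
  | none => acc  -- raise ValueError("Unknown instruction"): outside Pre_
  | some k =>
    let dm := (PySem.Int.divmod? (k : Int) 4).getD (0, 0)
    if op = "HLT" then acc ++ [(dm.1, dm.2, 0, 0, 0, 0)]
    else if op = "LOAD" then acc ++ [(dm.1, dm.2, 0, 2, pyInt (rtail (part t 1)), pyInt (part t 2))]
    else if op = "NOT" then acc ++ [(dm.1, dm.2, 0, 0, pyInt (rtail (part t 1)), 0)]
    else if op = "COPY" then acc ++ [(dm.1, dm.2, 0, 0, pyInt (rtail (part t 2)), pyInt (rtail (part t 1)))]
    else acc ++ [(dm.1, dm.2, 0, 0, pyInt (rtail (part t 1)), pyInt (rtail (part t 2)))]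

def compile_asm_alt (asm_code : String) : List (Int × Int × Int × Int × Int × Int) :=
  (scanB asm_code.toList [] [] [] false).foldl emitB []

-- ===== PRECONDITION & SPEC =====
-- Pre_ excludes exactly the inputs on which A raises: any non-blank line whose first token
-- (uppercased) is not an opcode (ValueError), which has too few operand tokens (IndexError),
-- or whose operand tokens do not parse as Python ints (ValueError).
def lineOk (raw : String) : Bool :=
  let line := PySem.Str.strip (((PySem.Str.split? raw "--").getD []).headD "")
  if line = "" then true
  else
    match PySem.Str.split₀ (PySem.Str.replace line "," " ") with
    | [] => false
    | p0 :: rest =>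
      let op := PySem.Str.upper p0
      let regOk := fun (s : String) => (PySem.Int.ofStr? (PySem.Str.slice s (some 1) none)).isSome
      let immOk := fun (s : String) => (PySem.Int.ofStr? s).isSome
      if op = "HLT" then true
      else if op = "LOAD" then decide (2 ≤ rest.length) && regOk (rest.headD "") && immOk (rest.getD 1 "")
      else if op ∈ ["ADD", "SUB", "MUL", "DIV", "MIN", "MAX", "MOD", "STORE", "COPY"] then
        decide (2 ≤ rest.length) && regOk (rest.headD "") && regOk (rest.getD 1 "")
      else if op = "NOT" then decide (1 ≤ rest.length) && regOk (rest.headD "")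
      else false

def Pre_compile_asm (asm_code : String) : Prop :=
  (((PySem.Str.split? asm_code "\n").getD []).all lineOk) = true
instance (asm_code : String) : Decidable (Pre_compile_asm asm_code) := by
  unfold Pre_compile_asm; infer_instance

def pvWitness_compile_asm : String := "LOAD R0, 3\nADD R1 R2 -- add\n\nnot r1\nHLT"

def Spec_compile_asm (asm_code : String) (out : List (Int × Int × Int × Int × Int × Int)) : Prop := out = compile_asm_alt asm_code
instance (asm_code : String) (out : List (Int × Int × Int × Int × Int × Int)) : Decidable (Spec_compile_asm asm_code out) := by unfold Spec_compile_asm; infer_instance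

-- ===== CLAIM (what is proved, stated in full; the proofs are below) =====
def Claim_equal_compile_asm : Prop := ∀ (asm_code : String), Dom_compile_asm asm_code → Pre_compile_asm asm_code → Spec_compile_asm asm_code (compile_asm asm_code)

-- ===== LEMMAS AND PROOFS =====

-- reference single-line tokenizer (maximal runs of non-whitespace, non-comma characters)
def tokC : List Char → List Char → List (List Char)
  | [], cur => if cur = [] then [] else [cur]
  | c :: t, cur =>
      if PySem.Chars.isspace c ∨ c = ',' then
        (if cur = [] then tokC t [] else cur :: tokC t [])
      else tokC t (cur ++ [c])

-- the prefix of a line before the first "--"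
def ddPrefix : List Char → List Char
  | [] => []
  | c :: t => if c = '-' ∧ t.head? = some '-' then [] else c :: ddPrefix t

-- reference newline splitter
def splitNL : List Char → List (List Char)
  | [] => [[]]
  | c :: t =>
      if c = '\n' then [] :: splitNL t
      else
        match splitNL t with
        | [] => [[c]]
        | l :: ls => (c :: l) :: ls

-- single-line scanner: scanB restricted to one line (no '\n' branch)
def lineScanP : List Char → List Char → List String → Bool → List String
  | [], cur, toks, _ => if cur = [] then toks else toks ++ [String.ofList cur]
  | c :: t, cur, toks, comment =>
      if comment then lineScanP t cur toks comment
      else if c = '-' ∧ t.head? = some '-' then lineScanP t cur toks true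
      else if PySem.Chars.isspace c ∨ c = ',' then
        lineScanP t [] (if cur = [] then toks else toks ++ [String.ofList cur]) comment
      else lineScanP t (cur ++ [c]) toks comment

def flushL (t : List String) (L : List (List String)) : List (List String) :=
  if t = [] then L else L ++ [t]

def cm2sp (c : Char) : Char := if c = ',' then ' ' else c

theorem splitNL_ne_nil (cs : List Char) : splitNL cs ≠ [] := by
  match cs with
  | [] => simp [splitNL]
  | c :: t =>
    simp only [splitNL]
    split
    · simp
    · split <;> simp

theorem splitOn_nl_go (fuel : Nat) (cs : List Char) (cur : List Char) (acc : List (List Char))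
    (h : cs.length < fuel) :
    PySem.Chars.splitOn.go ['\n'] fuel cs cur acc =
      acc.reverse ++ (match splitNL cs with
        | [] => []
        | l :: ls => (cur.reverse ++ l) :: ls) := by
  induction fuel generalizing cs cur acc with
  | zero => omega
  | succ f ih =>
    match cs with
    | [] => simp [PySem.Chars.splitOn.go, splitNL]
    | c :: t =>
      by_cases hc : c = '\n'
      · subst hc
        have hpre : List.isPrefixOf ['\n'] ('\n' :: t) = true := by
          simp [List.isPrefixOf]
        rw [show PySem.Chars.splitOn.go ['\n'] (f+1) ('\n' :: t) cur acc =
              PySem.Chars.splitOn.go ['\n'] f (List.drop 1 ('\n' :: t)) [] (cur.reverse :: acc) by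
          simp [PySem.Chars.splitOn.go, hpre]]
        simp only [List.drop_succ_cons, List.drop_zero]
        rw [ih t [] (cur.reverse :: acc) (by simpa using Nat.lt_of_succ_lt_succ h)]
        have := splitNL_ne_nil t
        cases hs : splitNL t with
        | nil => exact absurd hs this
        | cons l ls => simp [splitNL, hs]
      · have hpre : List.isPrefixOf ['\n'] (c :: t) = false := by
          simp [List.isPrefixOf, Ne.symm hc]
        rw [show PySem.Chars.splitOn.go ['\n'] (f+1) (c :: t) cur acc =
              PySem.Chars.splitOn.go ['\n'] f t (c :: cur) acc by
          simp [PySem.Chars.splitOn.go, hpre]]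
        rw [ih t (c :: cur) acc (Nat.lt_of_succ_lt_succ h)]
        have := splitNL_ne_nil t
        cases hs : splitNL t with
        | nil => exact absurd hs this
        | cons l ls => simp [splitNL, hc, hs]

theorem splitOn_nl (cs : List Char) :
    PySem.Chars.splitOn cs ['\n'] = splitNL cs := by
  unfold PySem.Chars.splitOn
  rw [splitOn_nl_go (cs.length + 1) cs [] [] (by omega)]
  have := splitNL_ne_nil cs
  cases hs : splitNL cs with
  | nil => exact absurd hs this
  | cons l ls => simp

theorem splitOn_dd_go (fuel : Nat) (cs : List Char) (cur : List Char) (acc : List (List Char))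
    (h : cs.length < fuel) :
    ∃ rest, PySem.Chars.splitOn.go ['-', '-'] fuel cs cur acc =
      acc.reverse ++ (cur.reverse ++ ddPrefix cs) :: rest := by
  induction fuel generalizing cs cur acc with
  | zero => omega
  | succ f ih =>
    match cs with
    | [] => exact ⟨[], by simp [PySem.Chars.splitOn.go, ddPrefix]⟩
    | c :: t =>
      by_cases hdd : c = '-' ∧ t.head? = some '-'
      · obtain ⟨hc, ht⟩ := hdd
        subst hc
        cases t with
        | nil => simp at ht
        | cons d t' =>
          have hd : d = '-' := by simpa using ht
          subst hd
          have hpre : List.isPrefixOf ['-', '-'] ('-' :: '-' :: t') = true := by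
            simp [List.isPrefixOf]
          rw [show PySem.Chars.splitOn.go ['-','-'] (f+1) ('-' :: '-' :: t') cur acc =
                PySem.Chars.splitOn.go ['-','-'] f (List.drop 2 ('-' :: '-' :: t')) [] (cur.reverse :: acc) by
            simp [PySem.Chars.splitOn.go, hpre]]
          simp only [List.drop_succ_cons, List.drop_zero]
          obtain ⟨rest, hr⟩ := ih t' [] (cur.reverse :: acc) (by simp only [List.length_cons] at h; omega)
          refine ⟨ddPrefix t' :: rest, ?_⟩
          rw [hr]
          simp [ddPrefix]
      · have hpre : List.isPrefixOf ['-', '-'] (c :: t) = false := by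
          rcases t with _ | ⟨d, t'⟩
          · simp [List.isPrefixOf]
          · by_cases hc : c = '-'
            · subst hc
              have hd : d ≠ '-' := by
                intro hd; exact hdd ⟨rfl, by simp [hd]⟩
              simp [List.isPrefixOf, Ne.symm hd]
            · simp [List.isPrefixOf, Ne.symm hc]
        rw [show PySem.Chars.splitOn.go ['-','-'] (f+1) (c :: t) cur acc =
              PySem.Chars.splitOn.go ['-','-'] f t (c :: cur) acc by
          simp [PySem.Chars.splitOn.go, hpre]]
        obtain ⟨rest, hr⟩ := ih t (c :: cur) acc (Nat.lt_of_succ_lt_succ h)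
        refine ⟨rest, ?_⟩
        rw [hr]
        simp [ddPrefix, hdd]

theorem splitOn_dd (cs : List Char) :
    ∃ rest, PySem.Chars.splitOn cs ['-', '-'] = ddPrefix cs :: rest := by
  unfold PySem.Chars.splitOn
  obtain ⟨rest, hr⟩ := splitOn_dd_go (cs.length + 1) cs [] [] (by omega)
  exact ⟨rest, by simpa using hr⟩

theorem replace_comma_go (fuel : Nat) (l : List Char) (acc : List Char)
    (h : l.length ≤ fuel) :
    PySem.Chars.replace.go [','] [' '] fuel l acc = acc.reverse ++ l.map cm2sp := by
  induction fuel generalizing l acc with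
  | zero =>
    have : l = [] := List.eq_nil_of_length_eq_zero (Nat.le_zero.mp h)
    subst this
    simp [PySem.Chars.replace.go]
  | succ f ih =>
    match l with
    | [] => simp [PySem.Chars.replace.go]
    | c :: t =>
      by_cases hc : c = ','
      · subst hc
        have hpre : List.isPrefixOf [','] (',' :: t) = true := by simp [List.isPrefixOf]
        rw [show PySem.Chars.replace.go [','] [' '] (f+1) (',' :: t) acc =
              PySem.Chars.replace.go [','] [' '] f (List.drop 1 (',' :: t)) ([' '].reverse ++ acc) by
          simp [PySem.Chars.replace.go, hpre]]
        simp only [List.drop_succ_cons, List.drop_zero, List.reverse_cons, List.reverse_nil]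
        rw [ih t _ (by simp at h; omega)]
        simp [cm2sp]
      · have hpre : List.isPrefixOf [','] (c :: t) = false := by simp [List.isPrefixOf, Ne.symm hc]
        rw [show PySem.Chars.replace.go [','] [' '] (f+1) (c :: t) acc =
              PySem.Chars.replace.go [','] [' '] f t (c :: acc) by
          simp [PySem.Chars.replace.go, hpre]]
        rw [ih t _ (by simp at h; omega)]
        simp [cm2sp, hc]

theorem replace_comma (l : List Char) :
    PySem.Chars.replace l [','] [' '] = l.map cm2sp := by
  unfold PySem.Chars.replace
  simp only [List.isEmpty_cons, if_neg]
  exact replace_comma_go l.length l [] (le_refl _)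

theorem isspace_cm2sp (c : Char) :
    (PySem.Chars.isspace (cm2sp c) = true) ↔ (PySem.Chars.isspace c = true ∨ c = ',') := by
  by_cases hc : c = ','
  · subst hc; simp [cm2sp]; decide
  · simp [cm2sp, hc]

theorem split₀_go_tok (h : List Char) (rcur : List Char) (acc : List (List Char)) :
    PySem.Chars.split₀.go (h.map cm2sp) rcur acc = acc.reverse ++ tokC h rcur.reverse := by
  induction h generalizing rcur acc with
  | nil =>
    simp only [List.map_nil, PySem.Chars.split₀.go, tokC]
    by_cases hc : rcur = []
    · simp [hc]
    · simp [hc, List.isEmpty_iff]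
  | cons c t ih =>
    simp only [List.map_cons, PySem.Chars.split₀.go]
    by_cases hs : PySem.Chars.isspace c = true ∨ c = ','
    · have hsp : PySem.Chars.isspace (cm2sp c) = true := (isspace_cm2sp c).mpr hs
      rw [if_pos hsp]
      by_cases hc : rcur = []
      · subst hc
        simp only [List.isEmpty_nil, if_pos rfl]
        rw [ih [] acc]
        simp [tokC, hs]
      · rw [if_neg (by simpa [List.isEmpty_iff] using hc)]
        rw [ih [] (rcur.reverse :: acc)]
        simp only [tokC, if_pos hs]
        rw [if_neg (by simpa using hc)]
        simp
    · have hsp : ¬ PySem.Chars.isspace (cm2sp c) = true := fun hh => hs ((isspace_cm2sp c).mp hh)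
      rw [if_neg hsp]
      have hc : c ≠ ',' := fun hc => hs (Or.inr hc)
      have : cm2sp c = c := by simp [cm2sp, hc]
      rw [this, ih (c :: rcur) acc]
      simp [tokC, hs]

theorem split₀_tok (h : List Char) :
    PySem.Chars.split₀ (h.map cm2sp) = tokC h [] := by
  unfold PySem.Chars.split₀
  simpa using split₀_go_tok h [] []

theorem tok_lstrip (h : List Char) :
    tokC (List.dropWhile PySem.Chars.isspace h) [] = tokC h [] := by
  induction h with
  | nil => rfl
  | cons c t ih =>
    by_cases hs : PySem.Chars.isspace c = true
    · rw [List.dropWhile_cons_of_pos hs]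
      rw [ih]
      simp [tokC, Or.inl hs]
    · rw [List.dropWhile_cons_of_neg hs]

theorem tok_all_space (tail : List Char) (htail : ∀ c ∈ tail, PySem.Chars.isspace c = true) :
    ∀ cur, tokC tail cur = if cur = [] then [] else [cur] := by
  induction tail with
  | nil => intro cur; rfl
  | cons c t ih =>
    intro cur
    have hc : PySem.Chars.isspace c = true := htail c (by simp)
    have ht : ∀ d ∈ t, PySem.Chars.isspace d = true := fun d hd => htail d (by simp [hd])
    simp only [tokC, if_pos (Or.inl hc)]
    by_cases hcur : cur = []
    · simp [hcur, ih ht []]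
    · simp [hcur, ih ht []]

theorem tok_ws_suffix (tail : List Char) (htail : ∀ c ∈ tail, PySem.Chars.isspace c = true)
    (l : List Char) (cur : List Char) : tokC (l ++ tail) cur = tokC l cur := by
  induction l generalizing cur with
  | nil =>
    simp only [List.nil_append]
    rw [tok_all_space tail htail cur]
    by_cases hcur : cur = [] <;> simp [hcur, tokC]
  | cons c l' ih =>
    simp only [List.cons_append, tokC]
    by_cases hs : PySem.Chars.isspace c = true ∨ c = ','
    · rw [if_pos hs, if_pos hs]
      by_cases hcur : cur = [] <;> simp [hcur, ih]
    · rw [if_neg hs, if_neg hs, ih]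

theorem tok_strip (h : List Char) :
    tokC (PySem.Chars.strip h) [] = tokC h [] := by
  unfold PySem.Chars.strip PySem.Chars.rstrip
  set x := PySem.Chars.lstrip h with hx
  have hdecomp : x = (List.dropWhile PySem.Chars.isspace x.reverse).reverse ++
      (List.takeWhile PySem.Chars.isspace x.reverse).reverse := by
    have htd := List.takeWhile_append_dropWhile (p := PySem.Chars.isspace) (l := x.reverse)
    have hxx : x = (List.takeWhile PySem.Chars.isspace x.reverse ++
        List.dropWhile PySem.Chars.isspace x.reverse).reverse := by rw [htd]; simp
    conv_lhs => rw [hxx]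
    exact List.reverse_append
  have htail : ∀ c ∈ (List.takeWhile PySem.Chars.isspace x.reverse).reverse,
      PySem.Chars.isspace c = true := by
    intro c hc
    exact List.mem_takeWhile_imp (by simpa using hc)
  calc tokC (List.dropWhile PySem.Chars.isspace x.reverse).reverse []
      = tokC ((List.dropWhile PySem.Chars.isspace x.reverse).reverse ++
          (List.takeWhile PySem.Chars.isspace x.reverse).reverse) [] := by
        rw [tok_ws_suffix _ htail]
    _ = tokC x [] := by rw [← hdecomp]
    _ = tokC h [] := by rw [hx]; exact tok_lstrip h

-- lineScanP in comment state just flushes the current token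
theorem lineScan_comment (l : List Char) (cur : List Char) (toks : List String) :
    lineScanP l cur toks true = if cur = [] then toks else toks ++ [String.ofList cur] := by
  induction l generalizing cur toks with
  | nil => rfl
  | cons c t ih => simp [lineScanP, ih]

theorem lineScan_tok (l : List Char) (cur : List Char) (toks : List String) :
    lineScanP l cur toks false = toks ++ (tokC (ddPrefix l) cur).map String.ofList := by
  induction l generalizing cur toks with
  | nil =>
    simp only [lineScanP, ddPrefix, tokC]
    by_cases hc : cur = [] <;> simp [hc]
  | cons c t ih =>
    by_cases hdd : c = '-' ∧ t.head? = some '-'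
    · rw [show lineScanP (c :: t) cur toks false = lineScanP t cur toks true by
        simp [lineScanP, hdd]]
      rw [lineScan_comment]
      simp only [ddPrefix, if_pos hdd, tokC]
      by_cases hc : cur = [] <;> simp [hc]
    · by_cases hs : PySem.Chars.isspace c = true ∨ c = ','
      · rw [show lineScanP (c :: t) cur toks false =
            lineScanP t [] (if cur = [] then toks else toks ++ [String.ofList cur]) false by
          simp [lineScanP, hdd, hs]]
        rw [ih]
        simp only [ddPrefix, if_neg hdd, tokC, if_pos hs]
        by_cases hc : cur = [] <;> simp [hc]
      · rw [show lineScanP (c :: t) cur toks false = lineScanP t (cur ++ [c]) toks false by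
          simp [lineScanP, hdd, hs]]
        rw [ih]
        simp [ddPrefix, hdd, tokC, hs]

theorem head_compat (t : List Char) (l1 : List Char) (ls : List (List Char))
    (hs : splitNL t = l1 :: ls) : (t.head? = some '-') ↔ (l1.head? = some '-') := by
  cases t with
  | nil =>
    have h1 : l1 = [] := by
      simp only [splitNL] at hs
      exact ((List.cons.inj hs).1).symm
    subst h1
    simp
  | cons d t' =>
    by_cases hd : d = '\n'
    · subst hd
      simp only [splitNL, if_pos rfl] at hs
      have h1 : l1 = [] := ((List.cons.inj hs).1).symm
      subst h1
      simp
    · simp only [splitNL, if_neg hd] at hs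
      cases hsp : splitNL t' with
      | nil => exact absurd hsp (splitNL_ne_nil t')
      | cons l ls' =>
        rw [hsp] at hs
        have h1 : l1 = d :: l := ((List.cons.inj hs).1).symm
        subst h1
        simp

-- the scanner, expressed line by line
theorem scan_lines (cs : List Char) (cur : List Char) (toks : List String)
    (lines : List (List String)) (comment : Bool) :
    scanB cs cur toks lines comment =
      (match splitNL cs with
       | [] => lines
       | l :: ls => ls.foldl (fun L l' => flushL (lineScanP l' [] [] false) L)
                      (flushL (lineScanP l cur toks comment) lines)) := by
  induction cs generalizing cur toks lines comment with
  | nil => simp [scanB, lineScanP, splitNL, flushL]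
  | cons c t ih =>
    by_cases hc : c = '\n'
    · subst hc
      rw [show scanB ('\n' :: t) cur toks lines comment =
            scanB t [] [] (flushL (lineScanP [] cur toks comment) lines) false by
        simp [scanB, lineScanP, flushL]]
      rw [ih]
      have := splitNL_ne_nil t
      cases hs : splitNL t with
      | nil => exact absurd hs this
      | cons l1 ls => simp [splitNL, hs]
    · have := splitNL_ne_nil t
      cases hs : splitNL t with
      | nil => exact absurd hs this
      | cons l1 ls =>
        have hsplit : splitNL (c :: t) = (c :: l1) :: ls := by simp [splitNL, hc, hs]
        rw [hsplit]
        have hhead := head_compat t l1 ls hs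
        cases comment with
        | true =>
          rw [show scanB (c :: t) cur toks lines true = scanB t cur toks lines true by
            simp [scanB, hc]]
          rw [ih, hs]
          have hl : lineScanP (c :: l1) cur toks true = lineScanP l1 cur toks true := by
            simp [lineScanP]
          simp only [hl]
        | false =>
          by_cases hdd : c = '-' ∧ t.head? = some '-'
          · rw [show scanB (c :: t) cur toks lines false = scanB t cur toks lines true by
              simp [scanB, hc, hdd]]
            rw [ih, hs]
            have hdd' : c = '-' ∧ l1.head? = some '-' := ⟨hdd.1, hhead.mp hdd.2⟩
            have hl : lineScanP (c :: l1) cur toks false = lineScanP l1 cur toks true := by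
              simp [lineScanP, hdd']
            simp only [hl]
          · have hdd' : ¬ (c = '-' ∧ l1.head? = some '-') := fun h => hdd ⟨h.1, hhead.mpr h.2⟩
            by_cases hsp : PySem.Chars.isspace c = true ∨ c = ','
            · rw [show scanB (c :: t) cur toks lines false =
                  scanB t [] (if cur = [] then toks else toks ++ [String.ofList cur]) lines false by
                simp [scanB, hc, hdd, hsp]]
              rw [ih, hs]
              have hl : lineScanP (c :: l1) cur toks false =
                  lineScanP l1 [] (if cur = [] then toks else toks ++ [String.ofList cur]) false := by
                simp [lineScanP, hdd', hsp]
              simp only [hl]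
            · rw [show scanB (c :: t) cur toks lines false =
                  scanB t (cur ++ [c]) toks lines false by
                simp [scanB, hc, hdd, hsp]]
              rw [ih, hs]
              have hl : lineScanP (c :: l1) cur toks false =
                  lineScanP l1 (cur ++ [c]) toks false := by
                simp [lineScanP, hdd', hsp]
              simp only [hl]

-- dispatchA and emitB agree on every token list
theorem dispatch_emit (acc : List (Int × Int × Int × Int × Int × Int)) (parts : List String) :
    dispatchA acc parts (PySem.Str.upper (part parts 0)) = emitB acc parts := by
  simp only [emitB]
  generalize PySem.Str.upper (part parts 0) = op
  by_cases h1 : op = "ADD"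
  · subst h1
    rw [show PySem.List.index? opsB "ADD" = some 0 from by decide]
    simp [dispatchA, instructionsA, PySem.Dict.get?, PySem.Dict.contains]
    all_goals decide
  by_cases h2 : op = "SUB"
  · subst h2
    rw [show PySem.List.index? opsB "SUB" = some 1 from by decide]
    simp [dispatchA, instructionsA, PySem.Dict.get?, PySem.Dict.contains]
    all_goals decide
  by_cases h3 : op = "MUL"
  · subst h3
    rw [show PySem.List.index? opsB "MUL" = some 2 from by decide]
    simp [dispatchA, instructionsA, PySem.Dict.get?, PySem.Dict.contains]
    all_goals decide
  by_cases h4 : op = "DIV"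
  · subst h4
    rw [show PySem.List.index? opsB "DIV" = some 3 from by decide]
    simp [dispatchA, instructionsA, PySem.Dict.get?, PySem.Dict.contains]
    all_goals decide
  by_cases h5 : op = "MIN"
  · subst h5
    rw [show PySem.List.index? opsB "MIN" = some 4 from by decide]
    simp [dispatchA, instructionsA, PySem.Dict.get?, PySem.Dict.contains]
    all_goals decide
  by_cases h6 : op = "MAX"
  · subst h6
    rw [show PySem.List.index? opsB "MAX" = some 5 from by decide]
    simp [dispatchA, instructionsA, PySem.Dict.get?, PySem.Dict.contains]
    all_goals decide
  by_cases h7 : op = "MOD"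
  · subst h7
    rw [show PySem.List.index? opsB "MOD" = some 6 from by decide]
    simp [dispatchA, instructionsA, PySem.Dict.get?, PySem.Dict.contains]
    all_goals decide
  by_cases h8 : op = "NOT"
  · subst h8
    rw [show PySem.List.index? opsB "NOT" = some 7 from by decide]
    simp [dispatchA, instructionsA, PySem.Dict.get?, PySem.Dict.contains]
    all_goals decide
  by_cases h9 : op = "LOAD"
  · subst h9
    rw [show PySem.List.index? opsB "LOAD" = some 8 from by decide]
    simp [dispatchA, instructionsA, PySem.Dict.get?, PySem.Dict.contains]
    all_goals decide
  by_cases h10 : op = "STORE"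
  · subst h10
    rw [show PySem.List.index? opsB "STORE" = some 9 from by decide]
    simp [dispatchA, instructionsA, PySem.Dict.get?, PySem.Dict.contains]
    all_goals decide
  by_cases h11 : op = "COPY"
  · subst h11
    rw [show PySem.List.index? opsB "COPY" = some 10 from by decide]
    simp [dispatchA, instructionsA, PySem.Dict.get?, PySem.Dict.contains]
    all_goals decide
  by_cases h12 : op = "HLT"
  · subst h12
    rw [show PySem.List.index? opsB "HLT" = some 11 from by decide]
    simp [dispatchA, instructionsA, PySem.Dict.get?, PySem.Dict.contains]
    all_goals decide
  have hidx : PySem.List.index? opsB op = none := by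
    rw [PySem.List.index?_eq_none_iff]
    simp only [opsB, List.mem_cons, List.not_mem_nil, or_false]
    push_neg
    exact ⟨h1, h2, h3, h4, h5, h6, h7, h8, h9, h10, h11, h12⟩
  rw [hidx]
  have hcon : instructionsA.contains op = false := by
    simp [instructionsA, PySem.Dict.contains]
    exact ⟨fun h => h1 h.symm, fun h => h2 h.symm, fun h => h3 h.symm, fun h => h4 h.symm,
      fun h => h5 h.symm, fun h => h6 h.symm, fun h => h7 h.symm, fun h => h8 h.symm,
      fun h => h9 h.symm, fun h => h10 h.symm, fun h => h11 h.symm, fun h => h12 h.symm⟩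
  simp [dispatchA, hcon]

-- per-line: stepA equals flushing the line's tokens through emitB
theorem step_line (acc : List (Int × Int × Int × Int × Int × Int)) (l : List Char) :
    stepA acc (String.ofList l) = (flushL (lineScanP l [] [] false) []).foldl emitB acc := by
  obtain ⟨rest, hdd⟩ := splitOn_dd l
  have htl : (String.ofList l).toList = l := by simp
  have hsp : ((PySem.Str.split? (String.ofList l) "--").getD []).headD "" =
      String.ofList (ddPrefix l) := by
    rw [PySem.Str.split?]
    rw [show PySem.Chars.split? (String.ofList l).toList ("--" : String).toList =
          some (PySem.Chars.splitOn l ['-', '-']) by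
      rw [htl, show ("--" : String).toList = ['-', '-'] from rfl, PySem.Chars.split?]; simp]
    rw [hdd]
    simp
  have hstrip : PySem.Str.strip (String.ofList (ddPrefix l)) =
      String.ofList (PySem.Chars.strip (ddPrefix l)) := by
    rw [PySem.Str.strip]; simp
  have hts : lineScanP l [] [] false = (tokC (ddPrefix l) []).map String.ofList := by
    simpa using lineScan_tok l [] []
  have htok : tokC (PySem.Chars.strip (ddPrefix l)) [] = tokC (ddPrefix l) [] := tok_strip _
  simp only [stepA, hsp, hstrip]
  by_cases hshe : PySem.Chars.strip (ddPrefix l) = []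
  · have htk : tokC (ddPrefix l) [] = [] := by rw [← htok, hshe]; rfl
    rw [if_pos (by rw [hshe]; try rfl)]
    rw [hts, htk]
    rfl
  · have hline : ¬ (String.ofList (PySem.Chars.strip (ddPrefix l)) = "") := by
      intro he
      apply hshe
      have := congrArg String.toList he
      simpa using this
    rw [if_neg hline]
    have hparts : PySem.Str.split₀
        (PySem.Str.replace (String.ofList (PySem.Chars.strip (ddPrefix l))) "," " ") =
        (tokC (ddPrefix l) []).map String.ofList := by
      rw [PySem.Str.replace]
      rw [show (String.ofList (PySem.Chars.strip (ddPrefix l))).toList =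
            PySem.Chars.strip (ddPrefix l) by simp]
      rw [show ("," : String).toList = [','] from rfl, show (" " : String).toList = [' '] from rfl]
      rw [replace_comma]
      rw [PySem.Str.split₀]
      rw [show (String.ofList ((PySem.Chars.strip (ddPrefix l)).map cm2sp)).toList =
            (PySem.Chars.strip (ddPrefix l)).map cm2sp by simp]
      rw [split₀_tok, htok]
    rw [hparts, hts]
    cases htk : tokC (ddPrefix l) [] with
    | nil =>
      simp only [List.map_nil]
      rw [show flushL [] [] = [] from rfl]
      simp only [List.foldl_nil]
      rw [show part ([] : List String) 0 = "" from by simp [part, PySem.List.pyGet?, PySem.List.pyIdx?]]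
      rw [show PySem.Str.upper "" = "" from by decide]
      simp [dispatchA, instructionsA, PySem.Dict.contains]
    | cons t0 tr =>
      rw [show flushL ((t0 :: tr).map String.ofList) [] = [(t0 :: tr).map String.ofList] from by
        simp [flushL]]
      simp only [List.foldl_cons, List.foldl_nil]
      exact dispatch_emit acc _

-- assembling the two folds
theorem fold_assemble (lls : List (List Char)) (L : List (List String))
    (mc : List (Int × Int × Int × Int × Int × Int)) :
    ((lls.foldl (fun L' l => flushL (lineScanP l [] [] false) L') L).foldl emitB mc) =
      (lls.map String.ofList).foldl stepA (L.foldl emitB mc) := by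
  induction lls generalizing L with
  | nil => rfl
  | cons l t ih =>
    simp only [List.foldl_cons, List.map_cons]
    rw [ih]
    have hinner : ((flushL (lineScanP l [] [] false) L).foldl emitB mc) =
        stepA (L.foldl emitB mc) (String.ofList l) := by
      rw [step_line (L.foldl emitB mc) l]
      unfold flushL
      by_cases hts : lineScanP l [] [] false = []
      · simp [hts]
      · simp [hts, List.foldl_append]
    rw [hinner]

-- ===== VERDICT (by name: the statement is the Claim_ definition above) =====
theorem compile_asm_spec : Claim_equal_compile_asm := by
  intro asm_code _ _
  unfold Spec_compile_asm compile_asm compile_asm_alt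
  have hnl : ("\n" : String).toList = ['\n'] := rfl
  have hsplit : (PySem.Str.split? asm_code "\n").getD [] =
      (splitNL asm_code.toList).map String.ofList := by
    rw [PySem.Str.split?]
    rw [show PySem.Chars.split? asm_code.toList ("\n" : String).toList =
          some (PySem.Chars.splitOn asm_code.toList ['\n']) by
      rw [hnl, PySem.Chars.split?]; simp]
    rw [splitOn_nl]
    rfl
  rw [hsplit]
  rw [scan_lines asm_code.toList [] [] [] false]
  have := splitNL_ne_nil asm_code.toList
  cases hs : splitNL asm_code.toList with
  | nil => exact absurd hs this
  | cons l ls =>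
    simp only
    rw [show ls.foldl (fun L l' => flushL (lineScanP l' [] [] false) L)
          (flushL (lineScanP l [] [] false) []) =
        (l :: ls).foldl (fun L l' => flushL (lineScanP l' [] [] false) L) [] by simp]
    rw [fold_assemble (l :: ls) [] []]
    simp
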